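-- pv_equiv track=rewrite | github.com/joereddington/major-public | main.py | convert_to_integer
-- ===== SOURCE A (Python) =====
-- def convert_to_integer(word):
--     #import must be a dictionary word
--     #Must return an integer (as a string)
--     word=word.lower()
--     replace_dict = {
--         'l': '1',
--         'n': '2',
--         'm': '3',
--         'r': '4',
--         'f': '5',
--         'v': '5',
--         'b': '6',
--         'p': '6',
--         't': '7',
--         'ch': '8',
--         'sh': '8',
--         'g': '9',
--         's': '0',
--         'd': '9',
--         'z': '0'
--     }
--
--     # Reverse the replace_dict for easier replacement
--     replace_dict_reverse = {k: v for k, v in replace_dict.items()}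
--
--     for key, value in replace_dict_reverse.items():
--         word = word.replace(key, value)
--     # Remove all non-numeric characters
--     result = ''.join([char for char in word if char.isdigit()])
--
--     return result
-- ===== SOURCE B (Python) =====
-- _DIGIT = {'l': '1', 'n': '2', 'm': '3', 'r': '4', 'f': '5', 'v': '5',
--           'b': '6', 'p': '6', 't': '7', 'g': '9', 's': '0', 'd': '9', 'z': '0'}
--
--
-- def convert_to_integer(word):
--     word = word.lower()
--     out = []
--     i = 0
--     while i < len(word):
--         if word[i:i + 2] in ('ch', 'sh'):
--             out.append('8')
--             i += 2
--         else:
--             out.append(_DIGIT.get(word[i], word[i]))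
--             i += 1
--     return ''.join(c for c in out if c.isdigit())
-- ===== Notes on version B (the rewrite author's own statement) =====
-- stated objective: alternative
-- what changed: A rewrites the whole string fifteen times with sequential str.replace passes; B makes a single left-to-right scan with a two-character lookahead for 'ch'/'sh' and a one-character digit map, then filters digits once.
import Mathlib
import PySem

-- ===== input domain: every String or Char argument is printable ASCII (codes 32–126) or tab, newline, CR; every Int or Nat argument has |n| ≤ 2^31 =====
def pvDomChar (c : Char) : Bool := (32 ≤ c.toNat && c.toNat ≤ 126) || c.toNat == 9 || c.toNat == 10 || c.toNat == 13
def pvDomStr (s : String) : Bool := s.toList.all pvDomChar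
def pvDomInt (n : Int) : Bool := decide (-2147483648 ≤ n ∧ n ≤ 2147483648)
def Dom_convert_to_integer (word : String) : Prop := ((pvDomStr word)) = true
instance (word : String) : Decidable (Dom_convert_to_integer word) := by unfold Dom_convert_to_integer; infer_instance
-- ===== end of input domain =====

-- B replaces A's fifteen sequential str.replace passes by one left-to-right scan with a
-- two-char lookahead for 'ch'/'sh' (objective: alternative single-pass algorithm, same cost).

-- ===== PORT A =====
def convert_to_integer (word : String) : String :=
  let w0 := PySem.Str.lower word
  let replace_dict : PySem.Dict String String := PySem.Dict.ofList
    [("l","1"),("n","2"),("m","3"),("r","4"),("f","5"),("v","5"),("b","6"),("p","6"),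
     ("t","7"),("ch","8"),("sh","8"),("g","9"),("s","0"),("d","9"),("z","0")]
  let replace_dict_reverse : PySem.Dict String String := PySem.Dict.ofList replace_dict.items
  let w1 := replace_dict_reverse.items.foldl (fun acc kv => PySem.Str.replace acc kv.1 kv.2) w0
  String.ofList (w1.toList.filter (fun c => PySem.Chars.isdigit c))

-- ===== PORT B =====
def altDigits : PySem.Dict Char Char := PySem.Dict.ofList
  [('l','1'),('n','2'),('m','3'),('r','4'),('f','5'),('v','5'),('b','6'),('p','6'),
   ('t','7'),('g','9'),('s','0'),('d','9'),('z','0')]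

def altScan : List Char → List Char
  | [] => []
  | [a] => [altDigits.getD a a]
  | a :: b :: t =>
      if (a == 'c' || a == 's') && b == 'h' then '8' :: altScan t
      else altDigits.getD a a :: altScan (b :: t)

def convert_to_integer_alt (word : String) : String :=
  let w := PySem.Str.lower word
  String.ofList ((altScan w.toList).filter (fun c => PySem.Chars.isdigit c))

-- ===== PRECONDITION & SPEC =====
def Spec_convert_to_integer (word : String) (out : String) : Prop := out = convert_to_integer_alt word
instance (word : String) (out : String) : Decidable (Spec_convert_to_integer word out) := by unfold Spec_convert_to_integer; infer_instance

-- ===== CLAIM (what is proved, stated in full; the proofs are below) =====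
def Claim_equal_convert_to_integer : Prop := ∀ (word : String), Dom_convert_to_integer word → Spec_convert_to_integer word (convert_to_integer word)

-- ===== LEMMAS AND PROOFS =====

-- single-char replacement, structurally (proved equal to Chars.replace with a 1-char pattern)
def g1 (c : Char) : Char :=
  if c = 'l' then '1' else if c = 'n' then '2' else if c = 'm' then '3' else
  if c = 'r' then '4' else if c = 'f' then '5' else if c = 'v' then '5' else
  if c = 'b' then '6' else if c = 'p' then '6' else if c = 't' then '7' else c

def g2 (c : Char) : Char :=
  if c = 'g' then '9' else if c = 's' then '0' else if c = 'd' then '9' else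
  if c = 'z' then '0' else c

-- two-char replacement, structurally
def rep2 (a b v : Char) : List Char → List Char
  | [] => []
  | [c] => [c]
  | c :: d :: t => if c = a ∧ d = b then v :: rep2 a b v t else c :: rep2 a b v (d :: t)

lemma go_nil (old new acc : List Char) (fuel : Nat) :
    PySem.Chars.replace.go old new fuel [] acc = acc.reverse := by
  cases fuel <;> rw [PySem.Chars.replace.go] <;> simp

lemma go_single (k v : Char) : ∀ (fuel : Nat) (l acc : List Char), l.length ≤ fuel →
    PySem.Chars.replace.go [k] [v] fuel l acc
      = acc.reverse ++ l.map (fun c => if c = k then v else c) := by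
  intro fuel
  induction fuel with
  | zero => intro l acc h; cases l with
    | nil => simp [go_nil]
    | cons c t => simp at h
  | succ n ih =>
    intro l acc h
    cases l with
    | nil => simp [go_nil]
    | cons c t =>
      rw [PySem.Chars.replace.go]
      by_cases hc : c = k
      · subst hc
        simp only [List.isPrefixOf]
        simp [ih t _ (by simpa using h)]
      · simp only [List.isPrefixOf]
        have : (k == c) = false := by simp; exact fun h' => hc h'.symm
        simp [this, ih t _ (by simpa using h), hc]

lemma go_pair (a b v : Char) : ∀ (fuel : Nat) (l acc : List Char), l.length ≤ fuel →
    PySem.Chars.replace.go [a, b] [v] fuel l acc = acc.reverse ++ rep2 a b v l := by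
  intro fuel
  induction fuel using Nat.strong_induction_on with
  | _ fuel ih =>
    intro l acc h
    match fuel, l with
    | fuel, [] => simp [go_nil, rep2]
    | fuel + 1, [c] =>
      rw [PySem.Chars.replace.go]
      have hp : List.isPrefixOf [a, b] [c] = false := by
        simp [List.isPrefixOf]
      simp [hp, go_nil, rep2]
    | fuel + 1, c :: d :: t =>
      rw [PySem.Chars.replace.go]
      by_cases hm : c = a ∧ d = b
      · obtain ⟨rfl, rfl⟩ := hm
        have hp : List.isPrefixOf [c, d] (c :: d :: t) = true := by simp [List.isPrefixOf]
        simp only [hp, if_true, List.length_cons, List.drop_succ_cons, List.drop_zero,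
          List.length_nil, Nat.zero_add]
        rw [ih fuel (by omega) t _ (by simp at h; omega)]
        simp [rep2]
      · have hp : List.isPrefixOf [a, b] (c :: d :: t) = false := by
          simp [List.isPrefixOf]
          intro h1 h2; exact hm ⟨h1.symm, h2.symm⟩
        simp only [hp, Bool.false_eq_true, if_false]
        rw [ih fuel (by omega) (d :: t) _ (by simp at h ⊢; omega)]
        simp [rep2, hm]

lemma replace_single (k v : Char) (l : List Char) :
    PySem.Chars.replace l [k] [v] = l.map (fun c => if c = k then v else c) := by
  rw [PySem.Chars.replace]
  simp [go_single k v l.length l [] (le_refl _)]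

lemma replace_pair (a b v : Char) (l : List Char) :
    PySem.Chars.replace l [a, b] [v] = rep2 a b v l := by
  rw [PySem.Chars.replace]
  simp [go_pair a b v l.length l [] (le_refl _)]

lemma rep2_cons (a b v c : Char) (l : List Char) (h : ¬(c = a ∧ l.head? = some b)) :
    rep2 a b v (c :: l) = c :: rep2 a b v l := by
  cases l with
  | nil => simp [rep2]
  | cons d t =>
    have : ¬(c = a ∧ d = b) := by simpa using h
    simp [rep2, this]

lemma rep2_head? (a b v : Char) (l : List Char) :
    (rep2 a b v l).head? = l.head? ∨ (rep2 a b v l).head? = some v := by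
  match l with
  | [] => left; rfl
  | [c] => left; rfl
  | c :: d :: t =>
    by_cases hm : c = a ∧ d = b
    · right; simp [rep2, hm]
    · left; simp [rep2, hm]

lemma step_eq (a : Char) : g2 (g1 a) = altDigits.getD a a := by
  have hd : altDigits = PySem.Dict.mk
    [('l','1'),('n','2'),('m','3'),('r','4'),('f','5'),('v','5'),('b','6'),('p','6'),
     ('t','7'),('g','9'),('s','0'),('d','9'),('z','0')] := by decide
  by_cases h1 : a = 'l'; · subst h1; decide
  by_cases h2 : a = 'n'; · subst h2; decide
  by_cases h3 : a = 'm'; · subst h3; decide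
  by_cases h4 : a = 'r'; · subst h4; decide
  by_cases h5 : a = 'f'; · subst h5; decide
  by_cases h6 : a = 'v'; · subst h6; decide
  by_cases h7 : a = 'b'; · subst h7; decide
  by_cases h8 : a = 'p'; · subst h8; decide
  by_cases h9 : a = 't'; · subst h9; decide
  by_cases h10 : a = 'g'; · subst h10; decide
  by_cases h11 : a = 's'; · subst h11; decide
  by_cases h12 : a = 'd'; · subst h12; decide
  by_cases h13 : a = 'z'; · subst h13; decide
  rw [hd]
  simp [g1, g2, PySem.Dict.getD, PySem.Dict.get?,
    h1, h2, h3, h4, h5, h6, h7, h8, h9, h10, h11, h12, h13,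
    Ne.symm h1, Ne.symm h2, Ne.symm h3, Ne.symm h4, Ne.symm h5, Ne.symm h6, Ne.symm h7,
    Ne.symm h8, Ne.symm h9, Ne.symm h10, Ne.symm h11, Ne.symm h12, Ne.symm h13]

lemma g1_eq_c_iff (a : Char) : g1 a = 'c' ↔ a = 'c' := by
  unfold g1; split_ifs <;> simp_all
lemma g1_eq_h_iff (a : Char) : g1 a = 'h' ↔ a = 'h' := by
  unfold g1; split_ifs <;> simp_all
lemma g1_eq_s_iff (a : Char) : g1 a = 's' ↔ a = 's' := by
  unfold g1; split_ifs <;> simp_all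

def aChain (l : List Char) : List Char :=
  (rep2 's' 'h' '8' (rep2 'c' 'h' '8' (l.map g1))).map g2

lemma main_lemma : ∀ (n : Nat) (l : List Char), l.length ≤ n →
    (aChain l).filter (fun c => PySem.Chars.isdigit c)
      = (altScan l).filter (fun c => PySem.Chars.isdigit c) := by
  intro n
  induction n with
  | zero =>
    intro l h
    cases l with
    | nil => rfl
    | cons c t => simp at h
  | succ n ih =>
    intro l h
    match l with
    | [] => rfl
    | [a] => simp [aChain, rep2, altScan, step_eq]
    | a :: b :: t =>
      by_cases hab : (a = 'c' ∨ a = 's') ∧ b = 'h'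
      · obtain ⟨ha, rfl⟩ := hab
        rcases ha with rfl | rfl
        · -- 'ch' window
          have e1 : aChain ('c' :: 'h' :: t) = '8' :: aChain t := by
            unfold aChain
            simp only [List.map_cons, show g1 'c' = 'c' from rfl, show g1 'h' = 'h' from rfl]
            rw [show rep2 'c' 'h' '8' ('c' :: 'h' :: (t.map g1)) = '8' :: rep2 'c' 'h' '8' (t.map g1) by simp [rep2]]
            rw [rep2_cons 's' 'h' '8' '8' _ (by simp)]
            simp [show g2 '8' = '8' from rfl]
          have e2 : altScan ('c' :: 'h' :: t) = '8' :: altScan t := by simp [altScan]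
          rw [e1, e2]
          simp only [List.filter_cons, show PySem.Chars.isdigit '8' = true from rfl]
          rw [ih t (by simp at h; omega)]
        · -- 'sh' window
          have e1 : aChain ('s' :: 'h' :: t) = '8' :: aChain t := by
            unfold aChain
            simp only [List.map_cons, show g1 's' = 's' from rfl, show g1 'h' = 'h' from rfl]
            rw [rep2_cons 'c' 'h' '8' 's' _ (by simp)]
            rw [rep2_cons 'c' 'h' '8' 'h' _ (by simp)]
            rw [show rep2 's' 'h' '8' ('s' :: 'h' :: rep2 'c' 'h' '8' (t.map g1))
                  = '8' :: rep2 's' 'h' '8' (rep2 'c' 'h' '8' (t.map g1)) by simp [rep2]]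
            simp [show g2 '8' = '8' from rfl]
          have e2 : altScan ('s' :: 'h' :: t) = '8' :: altScan t := by simp [altScan]
          rw [e1, e2]
          simp only [List.filter_cons, show PySem.Chars.isdigit '8' = true from rfl]
          rw [ih t (by simp at h; omega)]
      · -- no window at position 0
        have hnc : ¬(a = 'c' ∧ b = 'h') := fun ⟨h1, h2⟩ => hab ⟨Or.inl h1, h2⟩
        have hns : ¬(a = 's' ∧ b = 'h') := fun ⟨h1, h2⟩ => hab ⟨Or.inr h1, h2⟩
        have e1 : aChain (a :: b :: t) = g2 (g1 a) :: aChain (b :: t) := by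
          unfold aChain
          simp only [List.map_cons]
          rw [rep2_cons 'c' 'h' '8' (g1 a) _ (by
            rintro ⟨hc, hh⟩
            simp only [List.head?_cons, Option.some.injEq] at hh
            exact hnc ⟨(g1_eq_c_iff a).mp hc, (g1_eq_h_iff b).mp hh⟩)]
          rw [rep2_cons 's' 'h' '8' (g1 a) _ (by
            rintro ⟨hc, hh⟩
            rcases rep2_head? 'c' 'h' '8' (g1 b :: t.map g1) with hh2 | hh2 <;> rw [hh2] at hh
            · simp only [List.head?_cons, Option.some.injEq] at hh
              exact hns ⟨(g1_eq_s_iff a).mp hc, (g1_eq_h_iff b).mp hh⟩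
            · simp at hh)]
          simp
        have e2 : altScan (a :: b :: t) = altDigits.getD a a :: altScan (b :: t) := by
          have hcond : ((a == 'c' || a == 's') && b == 'h') = false := by
            simp only [Bool.and_eq_false_iff, Bool.or_eq_false_iff, beq_eq_false_iff_ne]
            by_cases hb : b = 'h'
            · left; constructor
              · exact fun hc => hnc ⟨hc, hb⟩
              · exact fun hs => hns ⟨hs, hb⟩
            · right; exact hb
          simp [altScan, hcond]
        rw [e1, e2, List.filter_cons, List.filter_cons, step_eq a,
          ih (b :: t) (by simp at h ⊢; omega)]

def fL (x : Char) : Char := if x = 'l' then '1' else x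
def fN (x : Char) : Char := if x = 'n' then '2' else x
def fM (x : Char) : Char := if x = 'm' then '3' else x
def fR (x : Char) : Char := if x = 'r' then '4' else x
def fF (x : Char) : Char := if x = 'f' then '5' else x
def fV (x : Char) : Char := if x = 'v' then '5' else x
def fB (x : Char) : Char := if x = 'b' then '6' else x
def fP (x : Char) : Char := if x = 'p' then '6' else x
def fT (x : Char) : Char := if x = 't' then '7' else x
def fG (x : Char) : Char := if x = 'g' then '9' else x
def fS (x : Char) : Char := if x = 's' then '0' else x
def fD (x : Char) : Char := if x = 'd' then '9' else x
def fZ (x : Char) : Char := if x = 'z' then '0' else x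

lemma comp1 (c : Char) :
    fT (fP (fB (fV (fF (fR (fM (fN (fL c)))))))) = g1 c := by
  by_cases h1 : c = 'l'; · subst h1; decide
  by_cases h2 : c = 'n'; · subst h2; decide
  by_cases h3 : c = 'm'; · subst h3; decide
  by_cases h4 : c = 'r'; · subst h4; decide
  by_cases h5 : c = 'f'; · subst h5; decide
  by_cases h6 : c = 'v'; · subst h6; decide
  by_cases h7 : c = 'b'; · subst h7; decide
  by_cases h8 : c = 'p'; · subst h8; decide
  by_cases h9 : c = 't'; · subst h9; decide
  simp [fL, fN, fM, fR, fF, fV, fB, fP, fT, g1, h1, h2, h3, h4, h5, h6, h7, h8, h9]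

lemma comp2 (c : Char) :
    fZ (fD (fS (fG c))) = g2 c := by
  by_cases h1 : c = 'g'; · subst h1; decide
  by_cases h2 : c = 's'; · subst h2; decide
  by_cases h3 : c = 'd'; · subst h3; decide
  by_cases h4 : c = 'z'; · subst h4; decide
  simp [fG, fS, fD, fZ, g2, h1, h2, h3, h4]

lemma map9 (l : List Char) :
    ((((((((l.map fL).map fN).map fM).map fR).map fF).map fV).map fB).map fP).map fT = l.map g1 := by
  induction l with
  | nil => rfl
  | cons a t ih =>
    repeat rw [List.map_cons]
    rw [ih, comp1 a]

lemma map4 (l : List Char) :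
    (((l.map fG).map fS).map fD).map fZ = l.map g2 := by
  induction l with
  | nil => rfl
  | cons a t ih =>
    repeat rw [List.map_cons]
    rw [ih, comp2 a]

lemma chain_eq (l : List Char) :
    PySem.Chars.replace (PySem.Chars.replace (PySem.Chars.replace (PySem.Chars.replace
      (PySem.Chars.replace (PySem.Chars.replace (PySem.Chars.replace (PySem.Chars.replace
      (PySem.Chars.replace (PySem.Chars.replace (PySem.Chars.replace (PySem.Chars.replace
      (PySem.Chars.replace (PySem.Chars.replace (PySem.Chars.replace l
      ['l'] ['1']) ['n'] ['2']) ['m'] ['3']) ['r'] ['4']) ['f'] ['5']) ['v'] ['5']) ['b'] ['6'])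
      ['p'] ['6']) ['t'] ['7']) ['c','h'] ['8']) ['s','h'] ['8']) ['g'] ['9']) ['s'] ['0'])
      ['d'] ['9']) ['z'] ['0'] = aChain l := by
  unfold aChain
  simp only [replace_single, replace_pair,
    show (fun c => if c = 'l' then '1' else c) = fL from rfl,
    show (fun c => if c = 'n' then '2' else c) = fN from rfl,
    show (fun c => if c = 'm' then '3' else c) = fM from rfl,
    show (fun c => if c = 'r' then '4' else c) = fR from rfl,
    show (fun c => if c = 'f' then '5' else c) = fF from rfl,
    show (fun c => if c = 'v' then '5' else c) = fV from rfl,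
    show (fun c => if c = 'b' then '6' else c) = fB from rfl,
    show (fun c => if c = 'p' then '6' else c) = fP from rfl,
    show (fun c => if c = 't' then '7' else c) = fT from rfl,
    show (fun c => if c = 'g' then '9' else c) = fG from rfl,
    show (fun c => if c = 's' then '0' else c) = fS from rfl,
    show (fun c => if c = 'd' then '9' else c) = fD from rfl,
    show (fun c => if c = 'z' then '0' else c) = fZ from rfl]
  rw [map9, map4]



-- ===== VERDICT (by name: the statement is the Claim_ definition above) =====
theorem convert_to_integer_spec : Claim_equal_convert_to_integer := by
  intro word _
  unfold Spec_convert_to_integer convert_to_integer convert_to_integer_alt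
  simp only []
  have hit : (PySem.Dict.ofList ((PySem.Dict.ofList
      [("l","1"),("n","2"),("m","3"),("r","4"),("f","5"),("v","5"),("b","6"),("p","6"),
       ("t","7"),("ch","8"),("sh","8"),("g","9"),("s","0"),("d","9"),("z","0")]
        : PySem.Dict String String).items)).items
      = [("l","1"),("n","2"),("m","3"),("r","4"),("f","5"),("v","5"),("b","6"),("p","6"),
         ("t","7"),("ch","8"),("sh","8"),("g","9"),("s","0"),("d","9"),("z","0")] := by decide
  rw [hit]
  simp only [List.foldl_cons, List.foldl_nil]
  apply congrArg
  simp only [PySem.Str.toList_replace,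
    show "l".toList = ['l'] from rfl, show "n".toList = ['n'] from rfl,
    show "m".toList = ['m'] from rfl, show "r".toList = ['r'] from rfl,
    show "f".toList = ['f'] from rfl, show "v".toList = ['v'] from rfl,
    show "b".toList = ['b'] from rfl, show "p".toList = ['p'] from rfl,
    show "t".toList = ['t'] from rfl, show "ch".toList = ['c','h'] from rfl,
    show "sh".toList = ['s','h'] from rfl, show "g".toList = ['g'] from rfl,
    show "s".toList = ['s'] from rfl, show "d".toList = ['d'] from rfl,
    show "z".toList = ['z'] from rfl, show "1".toList = ['1'] from rfl,
    show "2".toList = ['2'] from rfl, show "3".toList = ['3'] from rfl,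
    show "4".toList = ['4'] from rfl, show "5".toList = ['5'] from rfl,
    show "6".toList = ['6'] from rfl, show "7".toList = ['7'] from rfl,
    show "8".toList = ['8'] from rfl, show "9".toList = ['9'] from rfl,
    show "0".toList = ['0'] from rfl]
  rw [chain_eq]
  exact main_lemma ((PySem.Str.lower word).toList).length _ (le_refl _)
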